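-- pv_equiv track=rewrite | github.com/vwordsworth/advent-of-code | solutions/2018/day2/solution.py | determine_if_id_has_two_or_three_repeats
-- ===== SOURCE A (Python) =====
-- def determine_if_id_has_two_or_three_repeats(box_id):
--     letter_counts = {}
--
--     for letter in box_id:
--         if letter in letter_counts:
--             letter_counts[letter] += 1
--         else:
--             letter_counts[letter] = 1
--
--     counts = set(letter_counts.values())
--     return 2 in counts, 3 in counts
-- ===== SOURCE B (Python) =====
-- def determine_if_id_has_two_or_three_repeats(box_id):
--     s = sorted(box_id)
--     run_lengths = set()
--     i = 0
--     n = len(s)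
--     while i < n:
--         j = i + 1
--         while j < n and s[j] == s[i]:
--             j += 1
--         run_lengths.add(j - i)
--         i = j
--     return (2 in run_lengths, 3 in run_lengths)
-- ===== Notes on version B (the rewrite author's own statement) =====
-- stated objective: alternative
-- what changed: Instead of building a character-frequency dict and taking the set of its values, B sorts the characters and scans consecutive equal runs, collecting each run's length into a set; the answer is whether 2 (resp. 3) is among the run lengths.
import Mathlib
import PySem

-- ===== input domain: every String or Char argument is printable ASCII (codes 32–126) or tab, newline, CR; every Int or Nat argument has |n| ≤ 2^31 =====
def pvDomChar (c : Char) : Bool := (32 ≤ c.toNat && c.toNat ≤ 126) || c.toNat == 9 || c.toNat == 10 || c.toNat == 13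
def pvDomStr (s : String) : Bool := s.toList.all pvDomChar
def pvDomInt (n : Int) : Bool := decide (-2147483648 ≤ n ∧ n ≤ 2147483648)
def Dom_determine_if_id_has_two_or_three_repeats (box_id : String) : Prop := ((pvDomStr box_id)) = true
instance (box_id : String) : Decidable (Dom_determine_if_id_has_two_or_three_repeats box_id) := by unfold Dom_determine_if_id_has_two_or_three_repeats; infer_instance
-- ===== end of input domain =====

-- B sorts the characters and collects consecutive-run lengths into a set instead of building a frequency dict; alternative algorithm, not faster.


-- ===== PORT A =====
def determine_if_id_has_two_or_three_repeats (box_id : String) : Bool × Bool :=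
  let letter_counts : PySem.Dict Char Int :=
    box_id.toList.foldl (fun d letter =>
      if d.contains letter then d.insert letter (d.getD letter 0 + 1)
      else d.insert letter 1) PySem.Dict.empty
  let counts : PySem.Set Int := PySem.Set.ofList letter_counts.values
  (PySem.Set.contains counts 2, PySem.Set.contains counts 3)

-- ===== PORT B =====
-- Source B's outer while loop over indices i < j of the sorted list, represented by the suffix
-- starting at i (the scan only moves forward): the inner while computes j - i
-- = 1 + length of the run of characters equal to s[i] after position i (takeWhile),
-- and 'i = j' advances to the suffix past that run (dropWhile) — exact, since the
-- inner loop stops at the first character ≠ s[i].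
def pvRunCollect (s : List Char) (run_lengths : PySem.Set Nat) : PySem.Set Nat :=
  match s with
  | [] => run_lengths
  | c :: rest =>
      pvRunCollect (rest.dropWhile (fun x => x == c))
        (PySem.Set.add run_lengths (1 + (rest.takeWhile (fun x => x == c)).length))
termination_by s.length
decreasing_by
  simpa [Nat.lt_succ_iff] using List.length_dropWhile_le (fun x => x == c) rest

def determine_if_id_has_two_or_three_repeats_alt (box_id : String) : Bool × Bool :=
  let s := PySem.List.sorted box_id.toList (fun x => x) false
  let run_lengths := pvRunCollect s PySem.Set.empty
  (PySem.Set.contains run_lengths 2, PySem.Set.contains run_lengths 3)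

-- ===== PRECONDITION & SPEC =====
def Spec_determine_if_id_has_two_or_three_repeats (box_id : String) (out : Bool × Bool) : Prop := out = determine_if_id_has_two_or_three_repeats_alt box_id
instance (box_id : String) (out : Bool × Bool) : Decidable (Spec_determine_if_id_has_two_or_three_repeats box_id out) := by unfold Spec_determine_if_id_has_two_or_three_repeats; infer_instance

-- ===== CLAIM (what is proved, stated in full; the proofs are below) =====
def Claim_equal_determine_if_id_has_two_or_three_repeats : Prop := ∀ (box_id : String), Dom_determine_if_id_has_two_or_three_repeats box_id → Spec_determine_if_id_has_two_or_three_repeats box_id (determine_if_id_has_two_or_three_repeats box_id)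

-- ===== LEMMAS AND PROOFS =====

-- A's loop body never distinguishes the two branches: an absent key has getD = 0.
lemma loop_step_eq :
    (fun (d : PySem.Dict Char Int) letter =>
      if d.contains letter then d.insert letter (d.getD letter 0 + 1)
      else d.insert letter 1)
    = fun (d : PySem.Dict Char Int) letter => d.insert letter (d.getD letter 0 + 1) := by
  funext d letter
  by_cases h : d.contains letter = true
  · simp [h]
  · simp only [Bool.not_eq_true] at h
    rw [PySem.Dict.getD_of_not_contains d 0 h]
    simp [h]

-- membership of n among A's counter values ↔ some character occurs exactly n times
lemma counts_contains_eq (l : List Char) (n : Int) :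
    PySem.Set.contains (PySem.Set.ofList (PySem.Dict.values (PySem.Dict.counter l))) n
      = l.any (fun c => ((PySem.List.count l c : Int)) == n) := by
  rw [Bool.eq_iff_iff]
  simp only [PySem.Dict.values, PySem.Dict.items_counter, List.map_map,
    PySem.Set.contains_eq_listContains, List.contains_iff_mem,
    PySem.Set.mem_ofList, List.mem_map, List.any_eq_true, PySem.List.count_eq,
    beq_iff_eq, Function.comp]

-- in a sorted list c :: rest, the head's character does not survive dropWhile (== c)
lemma not_mem_dropWhile_of_sorted (c : Char) (rest : List Char)
    (h : (c :: rest).Pairwise (· ≤ ·)) :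
    c ∉ rest.dropWhile (fun x => x == c) := by
  intro hmem
  cases hdw : rest.dropWhile (fun x => x == c) with
  | nil => simp [hdw] at hmem
  | cons b dw' =>
    have hb : (b == c) = false := by
      have := List.head_dropWhile_not (fun x => x == c) (l := rest) (by simp [hdw])
      simpa [hdw] using this
    have hbc : b ≠ c := by simpa using hb
    rw [hdw] at hmem
    rcases List.mem_cons.mp hmem with h1 | h2
    · exact hbc h1.symm
    · -- b ≤ c from pairwise inside rest, c ≤ b from the head: b = c, contradiction
      have hrest : rest.Pairwise (· ≤ ·) := (List.pairwise_cons.mp h).2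
      have hdwsub : (rest.dropWhile (fun x => x == c)).Pairwise (· ≤ ·) :=
        List.Pairwise.sublist (List.dropWhile_sublist _) hrest
      rw [hdw] at hdwsub
      have hble : b ≤ c := (List.pairwise_cons.mp hdwsub).1 c h2
      have hcb : c ≤ b := by
        have hbmem : b ∈ rest := (List.dropWhile_sublist (p := fun x => x == c)).mem
          (by rw [hdw]; exact List.mem_cons_self)
        exact (List.pairwise_cons.mp h).1 b hbmem
      exact hbc (le_antisymm hble hcb)

-- run-length invariant of B's scan over a sorted list:
-- n is collected iff it was already in the accumulator or some character occurs exactly n times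
lemma mem_runCollect (s : List Char) (run_lengths : PySem.Set Nat) (n : Nat)
    (h : s.Pairwise (· ≤ ·)) :
    n ∈ pvRunCollect s run_lengths ↔ n ∈ run_lengths ∨ ∃ c ∈ s, s.count c = n := by
  induction s, run_lengths using pvRunCollect.induct with
  | case1 run_lengths => simp [pvRunCollect]
  | case2 run_lengths c rest ih =>
    have hrest : rest.Pairwise (· ≤ ·) := (List.pairwise_cons.mp h).2
    have hdwp : (rest.dropWhile (fun x => x == c)).Pairwise (· ≤ ·) :=
      List.Pairwise.sublist (List.dropWhile_sublist _) hrest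
    have hcnot : c ∉ rest.dropWhile (fun x => x == c) :=
      not_mem_dropWhile_of_sorted c rest h
    have htw : ∀ x ∈ rest.takeWhile (fun x => x == c), x = c := by
      intro x hx; simpa using List.mem_takeWhile_imp hx
    have hsplit : rest.takeWhile (fun x => x == c) ++ rest.dropWhile (fun x => x == c) = rest :=
      List.takeWhile_append_dropWhile
    have hsp : ∀ x : Char, rest.count x
        = (rest.takeWhile (fun y => y == c)).count x + (rest.dropWhile (fun y => y == c)).count x := by
      intro x
      conv_lhs => rw [← hsplit]
      exact List.count_append
    -- count of c in the whole list is 1 + the run length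
    have hcount_c : (c :: rest).count c = 1 + (rest.takeWhile (fun x => x == c)).length := by
      have h1 : (rest.takeWhile (fun x => x == c)).count c
          = (rest.takeWhile (fun x => x == c)).length :=
        List.count_eq_length.mpr (fun x hx => by simp [htw x hx])
      have h2 : (rest.dropWhile (fun x => x == c)).count c = 0 :=
        List.count_eq_zero.mpr hcnot
      have := hsp c
      simp only [List.count_cons_self]
      omega
    -- counts of characters surviving the drop are unchanged
    have hcount_other : ∀ x ∈ rest.dropWhile (fun x => x == c),
        (c :: rest).count x = (rest.dropWhile (fun x => x == c)).count x := by
      intro x hx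
      have hxc : x ≠ c := fun hxy => hcnot (hxy ▸ hx)
      have h0 : (rest.takeWhile (fun x => x == c)).count x = 0 :=
        List.count_eq_zero.mpr (fun hmem => hxc (htw x hmem))
      have := hsp x
      rw [List.count_cons]
      simp [Ne.symm hxc]
      omega
    rw [pvRunCollect, ih hdwp, PySem.Set.mem_add]
    constructor
    · rintro (⟨hin | hrun⟩ | ⟨x, hx, hcx⟩)
      · exact Or.inl hin
      · exact Or.inr ⟨c, List.mem_cons_self, by omega⟩
      · exact Or.inr ⟨x, List.mem_cons_of_mem _ ((List.dropWhile_sublist _).mem hx),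
          by rw [hcount_other x hx]; exact hcx⟩
    · rintro (hin | ⟨x, hx, hcx⟩)
      · exact Or.inl (Or.inl hin)
      · rcases List.mem_cons.mp hx with rfl | hxr
        · exact Or.inl (Or.inr (by omega))
        · rcases (by rw [← hsplit] at hxr; exact List.mem_append.mp hxr) with htw' | hdw'
          · -- x is in the run, so x = c and its count is the run length
            have hxc : x = c := htw x htw'
            subst hxc
            exact Or.inl (Or.inr (by omega))
          · exact Or.inr ⟨x, hdw', by rw [← hcount_other x hdw']; exact hcx⟩

-- B's answer for a given run length n, transported back to the unsorted list
lemma B_contains_iff (l : List Char) (n : Nat) :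
    PySem.Set.contains
      (pvRunCollect (PySem.List.sorted l (fun x => x) false) PySem.Set.empty) n = true
      ↔ ∃ c ∈ l, l.count c = n := by
  have hperm : (PySem.List.sorted l (fun x => x) false).Perm l :=
    PySem.List.sorted_perm l (fun x => x) false
  rw [PySem.Set.contains_iff,
    mem_runCollect _ _ _ (PySem.List.sorted_pairwise l (fun x => x))]
  simp only [PySem.Set.empty, List.not_mem_nil, false_or]
  constructor
  · rintro ⟨c, hc, hcnt⟩
    exact ⟨c, hperm.mem_iff.mp hc, by rw [← hperm.count_eq]; exact hcnt⟩
  · rintro ⟨c, hc, hcnt⟩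
    exact ⟨c, hperm.mem_iff.mpr hc, by rw [hperm.count_eq]; exact hcnt⟩

-- ===== VERDICT (by name: the statement is the Claim_ definition above) =====
theorem determine_if_id_has_two_or_three_repeats_spec : Claim_equal_determine_if_id_has_two_or_three_repeats := by
  intro box_id _
  unfold Spec_determine_if_id_has_two_or_three_repeats
  unfold determine_if_id_has_two_or_three_repeats determine_if_id_has_two_or_three_repeats_alt
  simp only [loop_step_eq, PySem.Dict.foldl_insert_getD_add_one_eq_counter,
    counts_contains_eq]
  refine Prod.ext ?_ ?_ <;>
    · rw [Bool.eq_iff_iff, List.any_eq_true, B_contains_iff]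
      constructor
      · rintro ⟨c, hc, hcnt⟩
        refine ⟨c, hc, ?_⟩
        simp [PySem.List.count_eq] at hcnt ⊢
        omega
      · rintro ⟨c, hc, hcnt⟩
        refine ⟨c, hc, ?_⟩
        simp [PySem.List.count_eq] at hcnt ⊢
        omega
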